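-- pv_equiv track=rewrite | github.com/pwmcclung/practProbs | rev_odd.py | reverse_odd_count
-- ===== SOURCE A (Python) =====
-- def reverse_odd_count(array):
--     counts = {}
--     for el in array:
--         counts[el] = counts.get(el, 0) + 1
--     odd_els = [el for el in array if counts[el] % 2 != 0]
--
--     rev_odd = odd_els[::-1]
--
--     res = []
--     odd_idx = 0
--     for el in array:
--         if counts[el] % 2 != 0:
--             res.append(rev_odd[odd_idx])
--             odd_idx += 1
--         else:
--             res.append(el)
--     return res
-- ===== SOURCE B (Python) =====
-- def reverse_odd_count(array):
--     counts = {}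
--     for el in array:
--         counts[el] = counts.get(el, 0) + 1
--     positions = [i for i in range(len(array)) if counts[array[i]] % 2 != 0]
--     res = list(array)
--     left, right = 0, len(positions) - 1
--     while left < right:
--         res[positions[left]], res[positions[right]] = res[positions[right]], res[positions[left]]
--         left += 1
--         right -= 1
--     return res
-- ===== Notes on version B (the rewrite author's own statement) =====
-- stated objective: alternative
-- what changed: Instead of extracting the odd-frequency elements, reversing that buffer and rebuilding the list with a consumption counter, B records the indices of odd-frequency elements, copies the array and reverses that subsequence in place with a two-pointer symmetric swap.
import Mathlib
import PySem

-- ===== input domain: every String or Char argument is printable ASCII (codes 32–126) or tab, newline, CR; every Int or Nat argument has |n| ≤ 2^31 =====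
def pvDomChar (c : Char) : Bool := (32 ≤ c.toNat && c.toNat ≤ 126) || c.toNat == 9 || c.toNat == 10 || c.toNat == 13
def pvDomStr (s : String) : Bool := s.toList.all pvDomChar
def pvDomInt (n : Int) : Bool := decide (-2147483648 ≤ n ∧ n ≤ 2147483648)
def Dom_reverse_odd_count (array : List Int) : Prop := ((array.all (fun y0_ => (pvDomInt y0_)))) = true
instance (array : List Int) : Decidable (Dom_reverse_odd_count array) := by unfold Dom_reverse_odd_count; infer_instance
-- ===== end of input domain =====

-- B reverses the odd-frequency subsequence in place via index positions and a two-pointer swap,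
-- instead of A's extract-reverse-rebuild with a consumption counter; same cost, different decomposition.

-- ===== PORT A =====
def reverse_odd_count (array : List Int) : List Int :=
  let counts : PySem.Dict Int Int :=
    array.foldl (fun d el => d.insert el (d.getD el 0 + 1)) PySem.Dict.empty
  -- counts[el] : el is always a key of counts (it was counted), so the lookup never raises
  let odd_els := array.filter (fun el => PySem.Int.mod (counts.getD el 0) 2 != 0)
  let rev_odd := (PySem.List.slice? odd_els none none (-1)).getD []   -- odd_els[::-1]
  -- rev_odd[odd_idx] : odd_idx always stays in range (one increment per odd element), so no IndexError
  (array.foldl (fun (s : List Int × Int) el =>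
      if PySem.Int.mod (counts.getD el 0) 2 != 0 then
        (s.1 ++ [PySem.List.pyGetD rev_odd s.2 0], s.2 + 1)
      else (s.1 ++ [el], s.2)) (([] : List Int), (0 : Int))).1

-- ===== PORT B =====
-- the while loop: indices taken from positions are always in range, hence pyGetD/pySetD never hit their defaults
def pvSwapLoop (pos : List Int) (res : List Int) (left right : Int) : List Int :=
  if h : left < right then
    let pl := PySem.List.pyGetD pos left 0
    let pr := PySem.List.pyGetD pos right 0
    let vl := PySem.List.pyGetD res pl 0
    let vr := PySem.List.pyGetD res pr 0
    pvSwapLoop pos (PySem.List.pySetD (PySem.List.pySetD res pl vr) pr vl) (left + 1) (right - 1)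
  else res
termination_by (right - left).toNat
decreasing_by omega

def reverse_odd_count_alt (array : List Int) : List Int :=
  let counts : PySem.Dict Int Int :=
    array.foldl (fun d el => d.insert el (d.getD el 0 + 1)) PySem.Dict.empty
  let positions := (PySem.List.pyRange 0 (PySem.List.len array) 1).filter
      (fun i => PySem.Int.mod (counts.getD (PySem.List.pyGetD array i 0) 0) 2 != 0)
  pvSwapLoop positions array 0 (PySem.List.len positions - 1)

-- ===== PRECONDITION & SPEC =====
def Spec_reverse_odd_count (array : List Int) (out : List Int) : Prop := out = reverse_odd_count_alt array
instance (array : List Int) (out : List Int) : Decidable (Spec_reverse_odd_count array out) := by unfold Spec_reverse_odd_count; infer_instance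

-- ===== CLAIM (what is proved, stated in full; the proofs are below) =====
def Claim_equal_reverse_odd_count : Prop := ∀ (array : List Int), Dom_reverse_odd_count array → Spec_reverse_odd_count array (reverse_odd_count array)

-- ===== LEMMAS AND PROOFS =====

-- the odd-frequency test both ports apply (their counts dict is Counter(array) by rfl)
def pvP (array : List Int) : Int → Bool :=
  fun el => PySem.Int.mod ((PySem.Dict.counter array).getD el 0) 2 != 0

-- the same test read through an index
def pvQ (array : List Int) : Nat → Bool := fun i => pvP array (array.getD i 0)

-- the indices (as naturals) of odd-frequency elements, in order
def pvPos (array : List Int) : List Nat := (List.range array.length).filter (pvQ array)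

-- A's rebuild loop, as a structural recursion consuming the reversed buffer
def pvMerge (p : Int → Bool) : List Int → List Int → List Int
  | [], _ => []
  | a :: t, s => if p a then s.head?.getD 0 :: pvMerge p t s.tail else a :: pvMerge p t s

theorem pvMerge_length (p : Int → Bool) : ∀ (xs s : List Int), (pvMerge p xs s).length = xs.length := by
  intro xs
  induction xs with
  | nil => intro s; simp [pvMerge]
  | cons a t ih => intro s; by_cases h : p a <;> simp [pvMerge, h, ih]

theorem pvMerge_getElem? (p : Int → Bool) :
    ∀ (xs s : List Int) (i : Nat), i < xs.length →
      (pvMerge p xs s)[i]? = some (if p xs[i]! then s.getD ((xs.take i).countP p) 0 else xs[i]!) := by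
  intro xs
  induction xs with
  | nil => intro s i h; simp at h
  | cons a t ih =>
    intro s i h
    cases i with
    | zero =>
      by_cases hp : p a <;>
        simp [pvMerge, hp, List.getD_eq_getElem?_getD, List.head?_eq_getElem?]
    | succ i =>
      have hi : i < t.length := by simpa using h
      by_cases hp : p a
      · simp only [pvMerge, if_pos hp, List.getElem?_cons_succ, ih s.tail i hi]
        simp [hp, List.getD_eq_getElem?_getD, List.getElem?_tail]
      · simp only [pvMerge, if_neg hp, List.getElem?_cons_succ, ih s i hi]
        simp [hp]

theorem pvA_fold (p : Int → Bool) (rev : List Int) :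
    ∀ (xs acc : List Int) (n : Nat),
      (List.foldl (fun (s : List Int × Int) el =>
          if p el then (s.1 ++ [PySem.List.pyGetD rev s.2 0], s.2 + 1)
          else (s.1 ++ [el], s.2)) (acc, (n : Int)) xs).1
        = acc ++ pvMerge p xs (rev.drop n) := by
  intro xs
  induction xs with
  | nil => intro acc n; simp [pvMerge]
  | cons a t ih =>
    intro acc n
    by_cases hp : p a
    · have h1 : (n : Int) + 1 = ((n + 1 : Nat) : Int) := by push_cast; ring
      simp only [List.foldl_cons, if_pos hp, h1, ih]
      simp [pvMerge, hp, PySem.List.pyGetD_natCast, List.getD_eq_getElem?_getD,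
        List.head?_drop, List.tail_drop]
    · simp only [List.foldl_cons, if_neg hp, ih]
      simp [pvMerge, hp]

theorem pvA_eq (array : List Int) :
    reverse_odd_count array
      = pvMerge (pvP array) array ((array.filter (pvP array)).reverse) := by
  show (array.foldl (fun (s : List Int × Int) el =>
      if pvP array el then
        (s.1 ++ [PySem.List.pyGetD
          ((PySem.List.slice? (array.filter (pvP array)) none none (-1)).getD []) s.2 0], s.2 + 1)
      else (s.1 ++ [el], s.2)) (([] : List Int), (0 : Int))).1 = _
  rw [PySem.List.slice?_none_none_neg_one, Option.getD_some]
  have h := pvA_fold (pvP array) ((array.filter (pvP array)).reverse) array [] 0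
  rw [List.drop_zero, List.nil_append] at h
  exact h

theorem pvB_positions (array : List Int) :
    ((PySem.List.pyRange 0 (PySem.List.len array) 1).filter
        (fun i => PySem.Int.mod
          ((PySem.Dict.counter array).getD (PySem.List.pyGetD array i 0) 0) 2 != 0))
      = (pvPos array).map (fun i : Nat => (i : Int)) := by
  rw [PySem.List.len_eq, PySem.List.pyRange_one]
  have h1 : (fun k : Nat => (0 : Int) + (k : Int)) = (fun k : Nat => (k : Int)) := by
    funext k; ring
  rw [h1, show (((array.length : Int)) - 0).toNat = array.length by simp]
  rw [List.filter_map]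
  unfold pvPos
  refine congrArg (List.map (fun i : Nat => (i : Int))) ?_
  apply List.filter_congr
  intro i _
  show _ = pvQ array i
  simp only [Function.comp_apply, pvQ, pvP, PySem.List.pyGetD_natCast]

theorem pvSwapLoop_length :
    ∀ (pos res : List Int) (l r : Int), (pvSwapLoop pos res l r).length = res.length := by
  intro pos res l r
  fun_induction pvSwapLoop pos res l r with
  | case1 res l r h pl pr vl vr ih => rw [ih]; simp [PySem.List.length_pySetD]
  | case2 => rfl

theorem pvSwapLoop_spec (posN : List Nat) (hp : posN.Pairwise (· < ·)) :
    ∀ (d : Nat) (res : List Int) (lk rk : Nat) (hd : rk - lk = d) (hrk : rk < posN.length)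
      (hall : ∀ x ∈ posN, x < res.length),
      (∀ k (hk1 : lk ≤ k) (hk2 : k ≤ rk),
          (pvSwapLoop (posN.map (fun i : Nat => (i : Int))) res (lk : Int) (rk : Int))[posN[k]'(by omega)]?
            = res[posN[lk + rk - k]'(by omega)]?)
      ∧ (∀ j : Nat, (∀ k (hk : k < posN.length), lk ≤ k → k ≤ rk → posN[k] ≠ j) →
          (pvSwapLoop (posN.map (fun i : Nat => (i : Int))) res (lk : Int) (rk : Int))[j]? = res[j]?) := by
  have hinj : ∀ k1 k2, (h1 : k1 < posN.length) → (h2 : k2 < posN.length) →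
      posN[k1] = posN[k2] → k1 = k2 := by
    intro k1 k2 h1 h2 heq
    by_contra hne
    rcases Nat.lt_or_ge k1 k2 with h | h
    · exact absurd heq (Nat.ne_of_lt (List.pairwise_iff_getElem.mp hp k1 k2 h1 h2 h))
    · have h' : k2 < k1 := by omega
      exact absurd heq.symm (Nat.ne_of_lt (List.pairwise_iff_getElem.mp hp k2 k1 h2 h1 h'))
  intro d
  induction d using Nat.strong_induction_on with
  | _ d ih =>
    intro res lk rk hd hrk hall
    by_cases hlr : lk < rk
    · -- one swap, then the inner segment by induction
      have hlk : lk < posN.length := by omega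
      have hcast : ((lk : Int) < (rk : Int)) := by exact_mod_cast hlr
      have hrk1 : 1 ≤ rk := by omega
      have hlen : (posN.map (fun i : Nat => (i : Int))).length = posN.length := by simp
      have hgl : PySem.List.pyGetD (posN.map (fun i : Nat => (i : Int))) (lk : Int) 0
          = ((posN[lk] : Nat) : Int) := by
        rw [PySem.List.pyGetD_natCast, List.getD_eq_getElem _ 0 (by simpa using hlk)]
        simp
      have hgr : PySem.List.pyGetD (posN.map (fun i : Nat => (i : Int))) (rk : Int) 0
          = ((posN[rk] : Nat) : Int) := by
        rw [PySem.List.pyGetD_natCast, List.getD_eq_getElem _ 0 (by simpa using hrk)]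
        simp
      have hll : posN[lk] < res.length := hall _ (List.getElem_mem hlk)
      have hrr : posN[rk] < res.length := hall _ (List.getElem_mem hrk)
      have hvl : PySem.List.pyGetD res ((posN[lk] : Nat) : Int) 0 = res[posN[lk]] := by
        rw [PySem.List.pyGetD_natCast, List.getD_eq_getElem _ 0 hll]
      have hvr : PySem.List.pyGetD res ((posN[rk] : Nat) : Int) 0 = res[posN[rk]] := by
        rw [PySem.List.pyGetD_natCast, List.getD_eq_getElem _ 0 hrr]
      set res' : List Int := (res.set posN[lk] res[posN[rk]]).set posN[rk] res[posN[lk]] with hres'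
      have hstep : pvSwapLoop (posN.map (fun i : Nat => (i : Int))) res (lk : Int) (rk : Int)
          = pvSwapLoop (posN.map (fun i : Nat => (i : Int))) res' ((lk + 1 : Nat) : Int) ((rk - 1 : Nat) : Int) := by
        rw [pvSwapLoop, dif_pos hcast]
        simp only [hgl, hgr, hvl, hvr, PySem.List.pySetD_natCast]
        rw [← hres', show ((lk : Int) + 1) = ((lk + 1 : Nat) : Int) by omega,
          show ((rk : Int) - 1) = ((rk - 1 : Nat) : Int) by omega]
      have hlen' : res'.length = res.length := by simp [hres']
      have hall' : ∀ x ∈ posN, x < res'.length := by rw [hlen']; exact hall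
      have hd' : (rk - 1) - (lk + 1) < d := by omega
      have hih := ih ((rk - 1) - (lk + 1)) hd' res' (lk + 1) (rk - 1) rfl (by omega) hall'
      -- distinctness of the two swapped cells and the inner cells
      have hne_lr : posN[lk] ≠ posN[rk] := fun h => by
        have := hinj lk rk hlk hrk h; omega
      constructor
      · intro k hk1 hk2
        rcases Nat.eq_or_lt_of_le hk1 with hkl | hkl
        · -- k = lk : cell posN[lk] is untouched by the inner loop and holds res[posN[rk]]
          subst hkl
          have huntouched : ∀ k', (hk' : k' < posN.length) → lk + 1 ≤ k' → k' ≤ rk - 1 →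
              posN[k'] ≠ posN[lk] := by
            intro k' hk' h1 h2 heq
            have := hinj k' lk hk' hlk heq; omega
          rw [hstep, hih.2 posN[lk] huntouched]
          have h1 : (res.set posN[lk] res[posN[rk]])[posN[lk]]? = some res[posN[rk]] :=
            List.getElem?_set_self (by simpa using hll)
          have hfin : lk + rk - lk = rk := by omega
          simp only [hres', List.getElem?_set_ne hne_lr.symm, h1, hfin]
          rw [List.getElem?_eq_getElem hrr]
        · rcases Nat.eq_or_lt_of_le hk2 with hkr | hkr
          · -- k = rk : cell posN[rk] holds res[posN[lk]]
            subst hkr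
            have huntouched : ∀ k', (hk' : k' < posN.length) → lk + 1 ≤ k' → k' ≤ k - 1 →
                posN[k'] ≠ posN[k] := by
              intro k' hk' h1 h2 heq
              have := hinj k' k hk' hrk heq; omega
            rw [hstep, hih.2 posN[k] huntouched]
            have hfin : lk + k - k = lk := by omega
            have hsetlen : posN[k] < (res.set posN[lk] res[posN[k]]).length := by
              simpa using hrr
            simp only [hres', List.getElem?_set_self hsetlen, hfin]
            rw [List.getElem?_eq_getElem hll]
          · -- lk < k < rk : inner loop, and its source cell is untouched by this swap
            have hk1' : lk + 1 ≤ k := by omega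
            have hk2' : k ≤ rk - 1 := by omega
            have hm : (lk + 1) + (rk - 1) - k = lk + rk - k := by omega
            have hmlt : lk + rk - k < posN.length := by omega
            have h1 := hih.1 k hk1' hk2'
            rw [hstep, h1]
            have hm2 : (lk + 1) + (rk - 1) - k = lk + rk - k := by omega
            have hne1 : posN[rk] ≠ posN[lk + rk - k]'(by omega) := by
              intro h; have := hinj rk (lk + rk - k) hrk (by omega) h; omega
            have hne2 : posN[lk] ≠ posN[lk + rk - k]'(by omega) := by
              intro h; have := hinj lk (lk + rk - k) hlk (by omega) h; omega
            simp only [hres', hm2, List.getElem?_set_ne hne1, List.getElem?_set_ne hne2]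
      · intro j hj
        have hj' : ∀ k', (hk' : k' < posN.length) → lk + 1 ≤ k' → k' ≤ rk - 1 → posN[k'] ≠ j := by
          intro k' hk' h1 h2
          exact hj k' hk' (by omega) (by omega)
        rw [hstep, hih.2 j hj']
        have hne1 : posN[rk] ≠ j := hj rk hrk (by omega) (le_refl _)
        have hne2 : posN[lk] ≠ j := hj lk hlk (le_refl _) (by omega)
        simp only [hres', List.getElem?_set_ne hne1, List.getElem?_set_ne hne2]
    · -- empty segment: the loop is the identity
      have hstop : pvSwapLoop (posN.map (fun i : Nat => (i : Int))) res (lk : Int) (rk : Int) = res := by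
        rw [pvSwapLoop, dif_neg]
        exact_mod_cast hlr
      constructor
      · intro k hk1 hk2
        rw [hstop]
        have hkk : lk + rk - k = k := by omega
        simp only [hkk]
      · intro j _
        rw [hstop]

theorem pv_countP_take (p : Int → Bool) :
    ∀ (xs : List Int) (i : Nat), i ≤ xs.length →
      (xs.take i).countP p = (List.range i).countP (fun j => p (xs.getD j 0)) := by
  intro xs
  induction xs with
  | nil =>
    intro i h
    have h0 : i = 0 := Nat.le_zero.mp (by simpa using h)
    subst h0
    simp
  | cons a t ih =>
    intro i h
    cases i with
    | zero => simp
    | succ i =>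
      have he : ((fun j => p ((a :: t).getD j 0)) ∘ Nat.succ) = fun j => p (t.getD j 0) := by
        funext j
        rfl
      rw [List.take_succ_cons, List.countP_cons, ih i (by simpa using h),
        List.range_succ_eq_map, List.countP_cons, List.countP_map, he]
      rfl

theorem pv_range_countP (q : Nat → Bool) (n i : Nat) (h : i ≤ n) :
    ((List.range n).filter q).countP (fun x => decide (x < i)) = (List.range i).countP q := by
  induction n with
  | zero => interval_cases i; simp
  | succ n ihn =>
    rcases Nat.eq_or_lt_of_le h with he | hlt
    · subst he
      rw [List.countP_filter]
      apply List.countP_congr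
      intro x hx
      simp only [List.mem_range] at hx
      simp [hx]
    · have h' : i ≤ n := by omega
      rw [List.range_succ, List.filter_append, List.countP_append, ihn h']
      have : (List.filter q [n]).countP (fun x => decide (x < i)) = 0 := by
        by_cases hq : q n <;> simp [hq, Nat.not_lt.mpr h']
      omega

theorem pv_strict_countP (l : List Nat) (hp : l.Pairwise (· < ·)) (k : Nat) (hk : k < l.length) :
    l.countP (fun x => decide (x < l[k])) = k := by
  have h1 : (l.take k).countP (fun x => decide (x < l[k])) = k := by
    have hall : ∀ x ∈ l.take k, (fun x => decide (x < l[k])) x = true := by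
      intro x hx
      obtain ⟨j, hj, rfl⟩ := List.getElem_of_mem hx
      have hj' : j < k := by simp at hj; omega
      rw [List.getElem_take]
      simpa using List.pairwise_iff_getElem.mp hp j k (by omega) hk hj'
    rw [List.countP_eq_length.mpr hall, List.length_take, Nat.min_eq_left (by omega)]
  have h2 : (l.drop k).countP (fun x => decide (x < l[k])) = 0 := by
    rw [List.countP_eq_zero]
    intro x hx
    obtain ⟨j, hj, rfl⟩ := List.getElem_of_mem hx
    rw [List.getElem_drop]
    rcases Nat.eq_zero_or_pos j with rfl | hj0
    · simp
    · have hj2 : k + j < l.length := by simp at hj; omega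
      have := List.pairwise_iff_getElem.mp hp k (k + j) hk hj2 (by omega)
      simp
      omega
  calc l.countP (fun x => decide (x < l[k]))
      = ((l.take k) ++ (l.drop k)).countP (fun x => decide (x < l[k])) := by
        rw [List.take_append_drop]
    _ = k := by
        rw [List.countP_append, h1, h2]
        omega


theorem pv_pos_lt (array : List Int) (k : Nat) (hk : k < (pvPos array).length) :
    (pvPos array)[k] < array.length := by
  have hm : (pvPos array)[k] ∈ pvPos array := List.getElem_mem hk
  have := List.mem_filter.mp hm
  simpa using this.1

theorem pv_pos_pairwise (array : List Int) : (pvPos array).Pairwise (· < ·) :=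
  List.Pairwise.filter _ List.pairwise_lt_range

theorem pv_rank (array : List Int) (k : Nat) (hk : k < (pvPos array).length) :
    (array.take ((pvPos array)[k])).countP (pvP array) = k := by
  have hlt := pv_pos_lt array k hk
  rw [pv_countP_take (pvP array) array _ (by omega)]
  have : (fun j => pvP array (array.getD j 0)) = pvQ array := rfl
  rw [this, ← pv_range_countP (pvQ array) array.length _ (by omega)]
  exact pv_strict_countP (pvPos array) (pv_pos_pairwise array) k hk

theorem pv_filter_eq_map (array : List Int) :
    array.filter (pvP array) = (pvPos array).map (fun i => array.getD i 0) := by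
  suffices h : ∀ (p : Int → Bool) (xs : List Int),
      xs.filter p = (((List.range xs.length).filter (fun i => p (xs.getD i 0))).map
        (fun i => xs.getD i 0)) by
    exact h (pvP array) array
  intro p xs
  induction xs with
  | nil => simp
  | cons a t ih =>
    have h1 : ((fun i => p ((a :: t).getD i 0)) ∘ Nat.succ) = fun i => p (t.getD i 0) := by
      funext i; rfl
    have h2 : ((fun i => (a :: t).getD i 0) ∘ Nat.succ) = fun i => t.getD i 0 := by
      funext i; rfl
    rw [List.length_cons, List.range_succ_eq_map, List.filter_cons, List.filter_cons,
      List.filter_map, h1]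
    by_cases hp : p a
    · rw [if_pos hp, if_pos (show p ((a :: t).getD 0 0) = true from hp),
        List.map_cons, List.map_map, h2, ← ih]
      rfl
    · rw [if_neg (by simpa using hp),
        if_neg (show ¬ p ((a :: t).getD 0 0) = true from by simpa using hp),
        List.map_map, h2, ← ih]

-- ===== VERDICT (by name: the statement is the Claim_ definition above) =====
theorem reverse_odd_count_spec : Claim_equal_reverse_odd_count := by
  intro array _
  unfold Spec_reverse_odd_count
  have hc : array.foldl (fun d el => d.insert el (d.getD el 0 + 1)) PySem.Dict.empty
      = PySem.Dict.counter array := PySem.Dict.foldl_insert_getD_add_one_eq_counter array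
  have hBdef : reverse_odd_count_alt array
      = pvSwapLoop ((pvPos array).map (fun i : Nat => (i : Int))) array 0
          ((((pvPos array).map (fun i : Nat => (i : Int))).length : Int) - 1) := by
    show pvSwapLoop _ array 0 (PySem.List.len _ - 1) = _
    rw [hc, pvB_positions, PySem.List.len_eq]
  set m := (pvPos array).length with hm
  have hmm : ((pvPos array).map (fun i : Nat => (i : Int))).length = m := by simp [hm]
  symm
  apply List.ext_getElem?_iff.mpr
  intro i
  by_cases hi : i < array.length
  · have hAi := pvMerge_getElem? (pvP array) array ((array.filter (pvP array)).reverse) i hi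
    rw [pvA_eq array, hAi]
    by_cases hq : pvQ array i
    · -- odd-frequency position: both sides read array[posN[m-1-k]]
      have hmem : i ∈ pvPos array := by
        simp only [pvPos, List.mem_filter, List.mem_range]
        exact ⟨hi, hq⟩
      obtain ⟨k, hk, hik⟩ := List.mem_iff_getElem.mp hmem
      have hm1 : 1 ≤ m := by omega
      have hrk : m - 1 < (pvPos array).length := by omega
      have hspec := (pvSwapLoop_spec (pvPos array) (pv_pos_pairwise array) (m - 1) array 0 (m - 1)
        rfl hrk (fun x hx => by
          have := List.mem_filter.mp hx
          simpa using this.1)).1 k (Nat.zero_le _) (by omega)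
      have hcast : (((pvPos array).map (fun i : Nat => (i : Int))).length : Int) - 1 = ((m - 1 : Nat) : Int) := by
        rw [hmm]; push_cast [hm1]; omega
      simp only [Nat.cast_zero, Nat.zero_add] at hspec
      rw [hik] at hspec
      rw [hBdef, hcast, hspec]
      -- now the A side value
      have hp : pvP array (array[i]!) = true := by
        have : array[i]! = array.getD i 0 := by
          rw [List.getD_eq_getElem _ 0 hi, getElem!_pos array i hi]
        rw [this]; exact hq
      rw [if_pos hp]
      have hrank : (array.take i).countP (pvP array) = k := by
        conv_lhs => rw [← hik]
        exact pv_rank array k hk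
      have hflen : (array.filter (pvP array)).length = m := by
        rw [pv_filter_eq_map]; simp [hm]
      have hlt2 : m - 1 - k < m := by omega
      have hrev : ((array.filter (pvP array)).reverse).getD k 0
          = array[(pvPos array)[m - 1 - k]'(by omega)]'(pv_pos_lt array _ (by omega)) := by
        rw [List.getD_eq_getElem?_getD, List.getElem?_reverse (by omega), hflen]
        rw [pv_filter_eq_map array, List.getElem?_map]
        have hsm : m - 1 - k < (pvPos array).length := by omega
        rw [List.getElem?_eq_getElem hsm]
        simp only [Option.map_some, Option.getD_some]
        rw [List.getD_eq_getElem _ 0 (pv_pos_lt array _ hsm)]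
      rw [hrank, hrev]
      exact List.getElem?_eq_getElem _
    · -- even-frequency position: both sides keep array[i]
      have hp : pvP array (array[i]!) = false := by
        have : array[i]! = array.getD i 0 := by
          rw [List.getD_eq_getElem _ 0 hi, getElem!_pos array i hi]
        rw [this]; exact Bool.eq_false_iff.mpr (by simpa [pvQ] using hq)
      rw [if_neg (by rw [hp]; simp)]
      rcases Nat.eq_zero_or_pos m with hm0 | hm1
      · have : reverse_odd_count_alt array = array := by
          rw [hBdef, hmm, hm0]
          rw [pvSwapLoop, dif_neg (by norm_num)]
        rw [this, List.getElem?_eq_getElem hi]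
        simp [getElem!_pos array i hi]
      · have hrk : m - 1 < (pvPos array).length := by omega
        have hspec := (pvSwapLoop_spec (pvPos array) (pv_pos_pairwise array) (m - 1) array 0 (m - 1)
          rfl hrk (fun x hx => by
            have := List.mem_filter.mp hx
            simpa using this.1)).2 i (by
              intro k hk _ _ hik
              exact hq (by
                have hmem : (pvPos array)[k] ∈ pvPos array := List.getElem_mem hk
                have := (List.mem_filter.mp hmem).2
                rwa [hik] at this))
        have hcast : (((pvPos array).map (fun i : Nat => (i : Int))).length : Int) - 1 = ((m - 1 : Nat) : Int) := by
          rw [hmm]; push_cast [hm1]; omega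
        simp only [Nat.cast_zero] at hspec
        rw [hBdef, hcast, hspec]
        rw [List.getElem?_eq_getElem hi]
        simp [getElem!_pos array i hi]
  · -- past the end: both sides are exhausted
    have hA : (reverse_odd_count array)[i]? = none := by
      rw [pvA_eq array, List.getElem?_eq_none]
      rw [pvMerge_length]; omega
    have hB : (reverse_odd_count_alt array)[i]? = none := by
      rw [hBdef, List.getElem?_eq_none]
      rw [pvSwapLoop_length]; omega
    rw [hA, hB]
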